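-- pv_equiv track=rewrite | github.com/masodori/interactive-web-scraper | src/scraper/utils/selectors.py | split_selector
-- ===== SOURCE A (Python) =====
-- from typing import Optional, List, Tuple
--
-- def split_selector(selector: str) -> List[str]:
--     """
--     Split compound selector into individual parts.
--
--     Args:
--         selector: CSS selector
--
--     Returns:
--         List of selector parts
--     """
--     # Handle different combinators
--     parts = []
--     current = ""
--     in_brackets = False
--
--     for char in selector:
--         if char == '[':
--             in_brackets = True
--             current += char
--         elif char == ']':
--             in_brackets = False
--             current += char
--         elif char in ' >+~' and not in_brackets:
--             if current:
--                 parts.append(current)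
--             if char != ' ':
--                 parts.append(char)
--             current = ""
--         else:
--             current += char
--
--     if current:
--         parts.append(current)
--
--     return [p for p in parts if p.strip()]
-- ===== SOURCE B (Python) =====
-- import re
--
-- _TOKEN = re.compile(r'\[[^\]]*\]?|[>+~ ]|[^\[>+~ ]+')
--
-- def split_selector(selector: str) -> list:
--     """Token-driven split: regex tokenizer + one walk over tokens."""
--     parts = []
--     current = ""
--     for tok in _TOKEN.findall(selector):
--         if tok in ('>', '+', '~'):
--             if current:
--                 parts.append(current)
--             parts.append(tok)
--             current = ""
--         elif tok == ' ':
--             if current: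
--                 parts.append(current)
--             current = ""
--         else:
--             current += tok
--     if current:
--         parts.append(current)
--     return [p for p in parts if p.strip()]
-- ===== Notes on version B (the rewrite author's own statement) =====
-- stated objective: faster
-- what changed: Replaced the character-by-character boolean-flag scanner with a regex tokenizer (bracket chunk / combinator / space / plain run) and a single walk over the tokens.
import Mathlib
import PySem

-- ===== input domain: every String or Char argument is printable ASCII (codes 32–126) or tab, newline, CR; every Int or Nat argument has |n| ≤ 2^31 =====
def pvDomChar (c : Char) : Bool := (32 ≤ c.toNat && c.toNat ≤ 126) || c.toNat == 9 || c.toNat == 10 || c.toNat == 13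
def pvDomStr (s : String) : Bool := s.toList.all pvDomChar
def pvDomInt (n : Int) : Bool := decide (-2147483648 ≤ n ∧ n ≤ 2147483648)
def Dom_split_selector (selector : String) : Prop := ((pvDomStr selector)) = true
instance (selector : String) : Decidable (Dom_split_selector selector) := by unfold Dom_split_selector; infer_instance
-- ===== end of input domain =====

-- B replaces A's character-by-character flag-driven scanner with a regex-style
-- tokenizer (bracket chunk / combinator / space / plain run) and a single walk
-- over the tokens; objective: idiomatic/alternative, same output everywhere.

-- ===== PORT A =====
-- state: (parts, current, in_brackets)
def scanStep (st : List (List Char) × List Char × Bool) (c : Char) :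
    List (List Char) × List Char × Bool :=
  let (parts, current, inb) := st
  if c = '[' then (parts, current ++ [c], true)
  else if c = ']' then (parts, current ++ [c], false)
  else if (c == ' ' || c == '>' || c == '+' || c == '~') && !inb then
    (((if current ≠ [] then parts ++ [current] else parts) ++
        (if c ≠ ' ' then [[c]] else [])), [], inb)
  else (parts, current ++ [c], inb)

def split_selector (selector : String) : List String :=
  match selector.toList.foldl scanStep ([], [], false) with
  | (parts, current, _) =>
    (((if current ≠ [] then parts ++ [current] else parts).filter
        (fun p => PySem.Chars.strip p ≠ [])).map String.ofList)

-- ===== PORT B =====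
def isComb (c : Char) : Bool := c == '>' || c == '+' || c == '~'

def isPlain (c : Char) : Bool := !(c == '[' || c == ' ' || isComb c)

-- the regex  \[[^\]]*\]? | [>+~ ] | [^\[>+~ ]+  as a tokenizer
def tokens : List Char → List (List Char)
  | [] => []
  | c :: rest =>
    if c = '[' then
      let body := rest.takeWhile (fun d => d ≠ ']')
      let rest' := rest.dropWhile (fun d => d ≠ ']')
      if rest' = [] then ['[' :: body]
      else ('[' :: body ++ [']']) :: tokens rest'.tail
    else if c == ' ' || isComb c then [c] :: tokens rest
    else (c :: rest.takeWhile isPlain) :: tokens (rest.dropWhile isPlain)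
  termination_by l => l.length
  decreasing_by
    · have h1 := List.length_dropWhile_le (fun d => d ≠ ']') rest
      simp_all; omega
    · simp
    · have := List.length_dropWhile_le isPlain rest
      simp; omega

def tokStep (st : List (List Char) × List Char) (t : List Char) :
    List (List Char) × List Char :=
  let (parts, current) := st
  if t = ['>'] ∨ t = ['+'] ∨ t = ['~'] then
    ((if current ≠ [] then parts ++ [current] else parts) ++ [t], [])
  else if t = [' '] then
    ((if current ≠ [] then parts ++ [current] else parts), [])
  else (parts, current ++ t)

def split_selector_alt (selector : String) : List String :=
  match (tokens selector.toList).foldl tokStep ([], []) with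
  | (parts, current) =>
    (((if current ≠ [] then parts ++ [current] else parts).filter
        (fun p => PySem.Chars.strip p ≠ [])).map String.ofList)

-- ===== PRECONDITION & SPEC =====
def Spec_split_selector (selector : String) (out : List String) : Prop := out = split_selector_alt selector
instance (selector : String) (out : List String) : Decidable (Spec_split_selector selector out) := by unfold Spec_split_selector; infer_instance

-- ===== CLAIM (what is proved, stated in full; the proofs are below) =====
def Claim_equal_split_selector : Prop := ∀ (selector : String), Dom_split_selector selector → Spec_split_selector selector (split_selector selector)

-- ===== LEMMAS AND PROOFS =====

theorem dropWhile_head_false {α : Type} (p : α → Bool) :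
    ∀ (l : List α) a r, l.dropWhile p = a :: r → p a = false := by
  intro l
  induction l with
  | nil => intro a r h; simp at h
  | cons x t ih =>
    intro a r h
    by_cases hx : p x
    · rw [List.dropWhile_cons_of_pos hx] at h; exact ih a r h
    · rw [List.dropWhile_cons_of_neg hx] at h
      obtain ⟨rfl, _⟩ := List.cons.inj h
      simpa using hx

-- scanning a run of plain characters just appends them to `current`
lemma scan_plain (run : List Char) (h : ∀ d ∈ run, isPlain d = true) :
    ∀ p c, List.foldl scanStep (p, c, false) run = (p, c ++ run, false) := by
  induction run with
  | nil => simp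
  | cons d t ih =>
    intro p c
    have hd : isPlain d = true := h d (by simp)
    have ht : ∀ x ∈ t, isPlain x = true := fun x hx => h x (by simp [hx])
    simp only [List.foldl_cons]
    obtain ⟨⟨h1, h2⟩, ⟨h3, h4⟩, h5⟩ :
        (¬d = '[' ∧ ¬d = ' ') ∧ (¬d = '>' ∧ ¬d = '+') ∧ ¬d = '~' := by
      simpa [isPlain, isComb] using hd
    by_cases hdc : d = ']'
    · subst hdc; simp [scanStep, ih ht]
    · simp [scanStep, h1, hdc, h2, h3, h4, h5, ih ht]

-- scanning inside brackets appends every non-']' character, flag stays true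
lemma scan_body (body : List Char) (h : ']' ∉ body) :
    ∀ p c, List.foldl scanStep (p, c, true) body = (p, c ++ body, true) := by
  induction body with
  | nil => simp
  | cons d t ih =>
    intro p c
    have hd : d ≠ ']' := by rintro rfl; simp at h
    have ht : ']' ∉ t := fun hx => h (by simp [hx])
    simp only [List.foldl_cons]
    by_cases h1 : d = '['
    · subst h1; simp [scanStep, ih ht]
    · simp [scanStep, h1, hd, ih ht]

lemma scan_tokens (s : List Char) : ∀ p c,
    ((List.foldl scanStep (p, c, false) s).1,
     (List.foldl scanStep (p, c, false) s).2.1) =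
    List.foldl tokStep (p, c) (tokens s) := by
  induction s using tokens.induct with
  | case1 => simp [tokens]
  | case2 rest rv hnil =>
    -- unbalanced '[': no ']' remains, so the whole tail is the bracket body
    intro p c
    have hnil' : List.dropWhile (fun d => decide (d ≠ ']')) rest = [] := hnil
    have hall := List.dropWhile_eq_nil_iff.mp hnil'
    have hrest : rest = rest.takeWhile (fun d => decide (d ≠ ']')) := by
      conv_lhs => rw [← List.takeWhile_append_dropWhile
        (p := fun d => decide (d ≠ ']')) (l := rest)]
      rw [hnil']; simp
    have hb : ']' ∉ rest.takeWhile (fun d => decide (d ≠ ']')) := by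
      intro hx
      have := List.mem_takeWhile_imp hx
      simp at this
    have htok : tokens ('[' :: rest)
        = ['[' :: rest.takeWhile (fun d => decide (d ≠ ']'))] := by
      rw [tokens]
      rw [if_pos hnil']
      simp
    rw [htok]
    simp only [List.foldl_cons, List.foldl_nil]
    have h1 : scanStep (p, c, false) '[' = (p, c ++ ['['], true) := by simp [scanStep]
    rw [h1]
    conv_lhs => rw [hrest]
    rw [scan_body _ hb]
    have h2 : tokStep (p, c) ('[' :: rest.takeWhile (fun d => decide (d ≠ ']')))
        = (p, c ++ ('[' :: rest.takeWhile (fun d => decide (d ≠ ']')))) := by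
      simp only [tokStep]
      have e : ∀ y : Char,
          '[' :: rest.takeWhile (fun d => decide (d ≠ ']')) = [y] → '[' = y := by
        intro y hy; injection hy
      rw [if_neg, if_neg]
      · intro hx; exact absurd (e _ hx) (by decide)
      · rintro (hx | hx | hx) <;> exact absurd (e _ hx) (by decide)
    rw [h2]
    simp
  | case3 rest rv hnil ih =>
    -- balanced bracket chunk: rest = body ++ ']' :: tail
    intro p c
    have hnil' : ¬ List.dropWhile (fun d => decide (d ≠ ']')) rest = [] := hnil
    have hb : ']' ∉ rest.takeWhile (fun d => decide (d ≠ ']')) := by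
      intro hx
      have := List.mem_takeWhile_imp hx
      simp at this
    obtain ⟨a, r, hdw⟩ : ∃ a r, rest.dropWhile (fun d => decide (d ≠ ']')) = a :: r := by
      cases h : rest.dropWhile (fun d => decide (d ≠ ']')) with
      | nil => exact absurd h hnil'
      | cons a r => exact ⟨a, r, rfl⟩
    have ha : a = ']' := by
      have := dropWhile_head_false _ _ _ _ hdw
      simpa using this
    subst ha
    have hrv : rv = ']' :: r := hdw
    simp only [hrv, List.tail_cons] at ih
    have htok : tokens ('[' :: rest)
        = ('[' :: rest.takeWhile (fun d => decide (d ≠ ']')) ++ [']']) :: tokens r := by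
      rw [tokens]
      rw [if_neg hnil', hdw]
      simp
    rw [htok]
    simp only [List.foldl_cons]
    have h1 : scanStep (p, c, false) '[' = (p, c ++ ['['], true) := by simp [scanStep]
    rw [h1]
    conv_lhs => rw [← List.takeWhile_append_dropWhile
      (p := fun d => decide (d ≠ ']')) (l := rest), hdw]
    rw [List.foldl_append, scan_body _ hb]
    simp only [List.foldl_cons]
    have h2 : scanStep (p, c ++ ['['] ++ rest.takeWhile (fun d => decide (d ≠ ']')), true) ']'
        = (p, c ++ ['['] ++ rest.takeWhile (fun d => decide (d ≠ ']')) ++ [']'], false) := by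
      simp [scanStep]
    rw [h2]
    have h3 : tokStep (p, c) ('[' :: rest.takeWhile (fun d => decide (d ≠ ']')) ++ [']'])
        = (p, c ++ ('[' :: rest.takeWhile (fun d => decide (d ≠ ']')) ++ [']'])) := by
      simp only [tokStep]
      have e : ∀ y : Char,
          '[' :: rest.takeWhile (fun d => decide (d ≠ ']')) ++ [']'] = [y] → '[' = y := by
        intro y hy
        cases htw : rest.takeWhile (fun d => decide (d ≠ ']')) with
        | nil => rw [htw] at hy; injection hy
        | cons x l =>
          rw [htw] at hy
          have := congrArg List.length hy
          simp at this
      rw [if_neg, if_neg]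
      · intro hx; exact absurd (e _ hx) (by decide)
      · rintro (hx | hx | hx) <;> exact absurd (e _ hx) (by decide)
    rw [h3, ih]
    have hc : c ++ ['['] ++ rest.takeWhile (fun d => decide (d ≠ ']')) ++ [']']
        = c ++ ('[' :: rest.takeWhile (fun d => decide (d ≠ ']')) ++ [']']) := by simp
    rw [hc]
  | case4 ch rest hbr hcomb ih =>
    -- single combinator / space token
    intro p c
    have htok : tokens (ch :: rest) = [ch] :: tokens rest := by
      rw [tokens]
      rw [if_neg hbr, if_pos hcomb]
    rw [htok]
    simp only [List.foldl_cons]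
    rcases (by simpa [isComb, or_assoc] using hcomb :
        ch = ' ' ∨ ch = '>' ∨ ch = '+' ∨ ch = '~') with h | h | h | h <;>
      subst h <;> simp only [scanStep, tokStep] <;> simp <;> exact ih _ _
  | case5 ch rest hbr hcomb ih =>
    -- plain run token
    intro p c
    have htok : tokens (ch :: rest)
        = (ch :: rest.takeWhile isPlain) :: tokens (rest.dropWhile isPlain) := by
      rw [tokens]
      rw [if_neg hbr, if_neg hcomb]
    rw [htok]
    have hcomb' : (ch == ' ' || ch == '>' || ch == '+' || ch == '~') = false := by
      simp [isComb] at hcomb; simp [hcomb]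
    have hplain : ∀ d ∈ rest.takeWhile isPlain, isPlain d = true :=
      fun d hd => List.mem_takeWhile_imp hd
    have h1 : scanStep (p, c, false) ch = (p, c ++ [ch], false) := by
      by_cases hc : ch = ']'
      · subst hc; simp [scanStep]
      · simp [scanStep, hbr, hc, hcomb']
    have hne : ∀ y : Char, ch :: rest.takeWhile isPlain = [y] → ch = y := by
      intro y hy; injection hy
    have h2 : tokStep (p, c) (ch :: rest.takeWhile isPlain)
        = (p, c ++ (ch :: rest.takeWhile isPlain)) := by
      simp only [tokStep]
      simp [isComb] at hcomb
      rw [if_neg, if_neg]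
      · intro hx
        have := hne _ hx
        simp [this] at hcomb
      · rintro (hx | hx | hx) <;> (have := hne _ hx; simp [this] at hcomb)
    simp only [List.foldl_cons]
    rw [h1, h2]
    conv_lhs => rw [← List.takeWhile_append_dropWhile (p := isPlain) (l := rest)]
    rw [List.foldl_append, scan_plain _ hplain, ih]
    have hc : c ++ [ch] ++ rest.takeWhile isPlain = c ++ (ch :: rest.takeWhile isPlain) := by simp
    rw [hc]

-- ===== VERDICT (by name: the statement is the Claim_ definition above) =====
theorem split_selector_spec : Claim_equal_split_selector := by
  intro selector _
  unfold Spec_split_selector split_selector split_selector_alt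
  have h := scan_tokens selector.toList [] []
  rcases hA : List.foldl scanStep ([], [], false) selector.toList with ⟨a, b, fl⟩
  rw [hA] at h
  simp only at h
  rw [← h]
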